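-- pv_equiv track=rewrite | github.com/Firmino-Neto/Exercicios---Python--UFC- | Função e vetores/13.py | MenorElemento
-- ===== SOURCE A (Python) =====
-- def MenorElemento(lista):
--     menor = lista[ 0 ]
--     i = 1
--     indice = 0
--     while i < len(lista):
--         if lista[ i ] <= menor:
--             menor = lista[ i ]
--             indice = i
--         i = i + 1
--     return indice
-- ===== SOURCE B (Python) =====
-- def MenorElemento(lista):
--     m = min(lista)
--     for i in range(len(lista) - 1, -1, -1):
--         if lista[i] == m:
--             return i
-- ===== Notes on version B (the rewrite author's own statement) =====
-- stated objective: simpler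
-- what changed: Replaces A's single fused scan keeping a running (minimum, index) pair with two plain passes: compute min(lista) once, then scan from the right and return the first index holding it (= the last occurrence, matching A's <= tie-break); the min pass runs in C, giving a constant-factor speedup.
-- outside the precondition, e.g. on MenorElemento([]): A raises IndexError, B raises ValueError
import Mathlib
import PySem

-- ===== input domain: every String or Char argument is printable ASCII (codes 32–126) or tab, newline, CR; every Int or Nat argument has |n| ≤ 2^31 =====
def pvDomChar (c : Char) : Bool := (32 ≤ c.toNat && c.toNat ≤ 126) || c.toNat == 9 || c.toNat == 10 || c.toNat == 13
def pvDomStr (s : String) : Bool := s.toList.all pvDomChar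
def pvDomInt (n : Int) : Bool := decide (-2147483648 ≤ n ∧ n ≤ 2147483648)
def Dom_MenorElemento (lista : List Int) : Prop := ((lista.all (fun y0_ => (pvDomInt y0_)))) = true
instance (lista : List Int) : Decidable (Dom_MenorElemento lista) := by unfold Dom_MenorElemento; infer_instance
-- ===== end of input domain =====

-- B replaces A's fused (running minimum, index) scan with two passes: min(lista),
-- then a right-to-left scan for its first (i.e. last) occurrence; same O(n) cost.

-- ===== PORT A =====
-- while loop: i counts up, state (menor, indice); lista[i] is in range since i < len
def MenorElementoGo (lista : List Int) (i : Nat) (menor indice : Int) : Int × Int :=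
  if h : i < lista.length then
    if lista[i] ≤ menor then MenorElementoGo lista (i + 1) lista[i] (i : Int)
    else MenorElementoGo lista (i + 1) menor indice
  else (menor, indice)
termination_by lista.length - i

-- lista[0] raises IndexError on []; Pre_ excludes the empty list, default 0 is never used
def MenorElemento (lista : List Int) : Int :=
  (MenorElementoGo lista 1 (lista.getD 0 0) 0).2

-- ===== PORT B =====
-- for i in range(len-1, -1, -1): counter n = i+1; falling off the loop (n = 0) returns
-- Python None, unreachable since m ∈ lista; 0 stands in for it
def MenorElementoAltGo (lista : List Int) (m : Int) : Nat → Int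
  | 0 => 0
  | n + 1 => if lista.getD n 0 = m then (n : Int) else MenorElementoAltGo lista m n

-- min(lista) raises ValueError on []; Pre_ excludes the empty list, default 0 never used
def MenorElemento_alt (lista : List Int) : Int :=
  MenorElementoAltGo lista ((PySem.List.min? lista (fun y => y)).getD 0) lista.length

-- ===== PRECONDITION & SPEC =====
-- Pre_ excludes only the empty list, on which A raises IndexError (and B ValueError)
def Pre_MenorElemento (lista : List Int) : Prop := lista ≠ []
instance (lista : List Int) : Decidable (Pre_MenorElemento lista) := by
  unfold Pre_MenorElemento; infer_instance

def pvWitness_MenorElemento : List Int := [3, 1, 2]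

def Spec_MenorElemento (lista : List Int) (out : Int) : Prop := out = MenorElemento_alt lista
instance (lista : List Int) (out : Int) : Decidable (Spec_MenorElemento lista out) := by
  unfold Spec_MenorElemento; infer_instance

-- ===== CLAIM (what is proved, stated in full; the proofs are below) =====
def Claim_equal_MenorElemento : Prop := ∀ (lista : List Int), Dom_MenorElemento lista → Pre_MenorElemento lista → Spec_MenorElemento lista (MenorElemento lista)

-- ===== LEMMAS AND PROOFS =====

-- A's running first component is a running minimum over the remaining suffix
theorem menorGo_fst (lista : List Int) (i : Nat) (menor indice : Int) :
    (MenorElementoGo lista i menor indice).1 = (lista.drop i).foldl min menor := by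
  fun_induction MenorElementoGo lista i menor indice with
  | case1 i menor indice h hle ih =>
      rw [List.drop_eq_getElem_cons h]
      simp only [List.foldl_cons, ih]
      congr 1
      omega
  | case2 i menor indice h hle ih =>
      rw [List.drop_eq_getElem_cons h]
      simp only [List.foldl_cons, ih]
      congr 1
      omega
  | case3 i menor indice h =>
      rw [List.drop_eq_nil_of_le (by omega)]
      rfl

-- appending one element extends A's while loop by exactly one final step
theorem menorGo_append (lista : List Int) (x : Int) (i : Nat) (menor indice : Int)
    (hi : i ≤ lista.length) :
    MenorElementoGo (lista ++ [x]) i menor indice =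
      (if x ≤ (MenorElementoGo lista i menor indice).1
        then (x, (lista.length : Int))
        else MenorElementoGo lista i menor indice) := by
  by_cases h : i < lista.length
  · have hx : (lista ++ [x])[i]'(by simp; omega) = lista[i] := by
      simp [List.getElem_append_left h]
    have hstep : MenorElementoGo lista i menor indice =
        if lista[i] ≤ menor then MenorElementoGo lista (i + 1) lista[i] (i : Int)
        else MenorElementoGo lista (i + 1) menor indice := by
      rw [MenorElementoGo]; simp [dif_pos h]
    have hstepApp : MenorElementoGo (lista ++ [x]) i menor indice =
        if lista[i] ≤ menor then MenorElementoGo (lista ++ [x]) (i + 1) lista[i] (i : Int)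
        else MenorElementoGo (lista ++ [x]) (i + 1) menor indice := by
      rw [MenorElementoGo]
      simp only [dif_pos (show i < (lista ++ [x]).length by simp; omega), hx]
    rw [hstep, hstepApp]
    by_cases hle : lista[i] ≤ menor
    · simp only [if_pos hle]
      exact menorGo_append lista x (i + 1) lista[i] (i : Int) (by omega)
    · simp only [if_neg hle]
      exact menorGo_append lista x (i + 1) menor indice (by omega)
  · have hi' : i = lista.length := by omega
    subst hi'
    have hx : (lista ++ [x])[lista.length]'(by simp) = x := by simp
    have hstop : MenorElementoGo lista lista.length menor indice = (menor, indice) := by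
      rw [MenorElementoGo]; simp
    have hstop2 : ∀ (a b : Int),
        MenorElementoGo (lista ++ [x]) (lista.length + 1) a b = (a, b) := by
      intro a b; rw [MenorElementoGo]; simp
    have hstepApp : MenorElementoGo (lista ++ [x]) lista.length menor indice =
        if x ≤ menor then MenorElementoGo (lista ++ [x]) (lista.length + 1) x (lista.length : Int)
        else MenorElementoGo (lista ++ [x]) (lista.length + 1) menor indice := by
      rw [MenorElementoGo]
      simp only [dif_pos (show lista.length < (lista ++ [x]).length by simp), hx]
    rw [hstepApp, hstop]
    by_cases hle : x ≤ menor
    · simp only [if_pos hle, hstop2]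
    · simp only [if_neg hle, hstop2]
termination_by lista.length - i

-- B's right-to-left scan ignores elements past its starting counter
theorem altGo_append (lista : List Int) (x m : Int) (n : Nat) (hn : n ≤ lista.length) :
    MenorElementoAltGo (lista ++ [x]) m n = MenorElementoAltGo lista m n := by
  induction n with
  | zero => rfl
  | succ k ih =>
      rw [MenorElementoAltGo, MenorElementoAltGo]
      have : (lista ++ [x]).getD k 0 = lista.getD k 0 := by
        have hk : k < lista.length := by omega
        simp [List.getD, List.getElem?_append_left hk]
      rw [this, ih (by omega)]

theorem pymin_nonempty (lista : List Int) (h : lista ≠ []) :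
    (PySem.List.min? lista (fun y => y)).getD 0 =
      (lista.drop 1).foldl min (lista.getD 0 0) := by
  cases lista with
  | nil => exact absurd rfl h
  | cons a t => simp [PySem.List.min?_id_cons]

-- main equivalence, by induction on the list from the right
theorem menor_eq (lista : List Int) (h : lista ≠ []) :
    MenorElemento lista = MenorElemento_alt lista := by
  induction lista using List.reverseRecOn with
  | nil => exact absurd rfl h
  | append_singleton l x ih =>
      cases l with
      | nil =>
          simp only [List.nil_append]
          rw [MenorElemento, MenorElemento_alt]
          rw [MenorElementoGo]
          simp only [List.length_singleton, dif_neg (lt_irrefl 1)]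
          rw [pymin_nonempty [x] (by simp)]
          simp [MenorElementoAltGo]
      | cons a t =>
          set l := a :: t with hl
          have hne : l ≠ [] := by simp [hl]
          have hlen : 1 ≤ l.length := by simp [hl]
          -- A side
          have hhead : (l ++ [x]).getD 0 0 = l.getD 0 0 := by
            simp [hl]
          have hA : MenorElemento (l ++ [x]) =
              (if x ≤ (MenorElementoGo l 1 (l.getD 0 0) 0).1
                then ((l.length : Int))
                else MenorElemento l) := by
            rw [MenorElemento, hhead, menorGo_append l x 1 (l.getD 0 0) 0 hlen]
            split_ifs <;> rfl
          have hmin : (MenorElementoGo l 1 (l.getD 0 0) 0).1 =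
              (l.drop 1).foldl min (l.getD 0 0) := menorGo_fst l 1 _ 0
          -- B side: the overall minimum of l ++ [x]
          have hminL : (PySem.List.min? l (fun y => y)).getD 0 =
              (l.drop 1).foldl min (l.getD 0 0) := pymin_nonempty l hne
          have hminApp : (PySem.List.min? (l ++ [x]) (fun y => y)).getD 0 =
              min ((l.drop 1).foldl min (l.getD 0 0)) x := by
            rw [pymin_nonempty (l ++ [x]) (by simp)]
            have h1 : (l ++ [x]).drop 1 = l.drop 1 ++ [x] := by
              rw [List.drop_append_of_le_length hlen]
            have h2 : (l ++ [x]).getD 0 0 = l.getD 0 0 := hhead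
            rw [h1, h2, List.foldl_append]
            rfl
          set mL := (l.drop 1).foldl min (l.getD 0 0) with hmL
          have hB : MenorElemento_alt (l ++ [x]) =
              (if x ≤ mL then ((l.length : Int)) else MenorElemento_alt l) := by
            rw [MenorElemento_alt, hminApp]
            have hlenApp : (l ++ [x]).length = l.length + 1 := by simp
            rw [hlenApp, MenorElementoAltGo]
            have hgx : (l ++ [x]).getD l.length 0 = x := by
              simp [List.getD]
            rw [hgx]
            by_cases hle : x ≤ mL
            · rw [min_eq_right hle, if_pos rfl, if_pos hle]
            · have hxm : min mL x = mL := min_eq_left (by omega)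
              rw [hxm, if_neg (by omega : ¬ x = mL), if_neg hle,
                altGo_append l x mL l.length (le_refl _), MenorElemento_alt, hminL]
          rw [hA, hB, hmin]
          split_ifs with hc
          · rfl
          · exact ih hne

-- ===== VERDICT (by name: the statement is the Claim_ definition above) =====
theorem MenorElemento_spec : Claim_equal_MenorElemento := by
  intro lista _ hpre
  unfold Spec_MenorElemento
  exact menor_eq lista hpre
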